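-- pv_equiv track=rewrite | github.com/gregchapman-dev/converter21 | converter21/humdrum/convert.py | _getElisionLevelWorker
-- ===== SOURCE A (Python) =====
-- def _getElisionLevelWorker(searchChar: str, text: str, index: int) -> int:
--     output: int = 0
--     foundSearchChar: bool = False
--     count: int = 0
--     target: int = index + 1
--
--     for i, ch in enumerate(text):
--         if ch == searchChar:
--             count += 1
--         if count == target:
--             foundSearchChar = True
--             # walk backward from i-1 counting contiguous '&'s
--             for ch1 in reversed(text[:i]):
--                 if ch1 == '&':
--                     output += 1
--                 else:
--                     break
--             break
--
--     if not foundSearchChar: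
--         return -1
--
--     return output
-- ===== SOURCE B (Python) =====
-- def _getElisionLevelWorker(searchChar: str, text: str, index: int) -> int:
--     # One pass: record the length of the contiguous '&' run immediately before
--     # each occurrence of searchChar, then simply index into that list.
--     runs = []
--     run = 0
--     for ch in text:
--         if ch == searchChar:
--             runs.append(run)
--         run = run + 1 if ch == '&' else 0
--     return runs[index] if 0 <= index < len(runs) else -1
-- ===== Notes on version B (the rewrite author's own statement) =====
-- stated objective: alternative
-- what changed: Instead of A's search loop with an inner backward walk over a slice text[:i], B makes one pass that collects the '&'-run length preceding every occurrence of searchChar into a list and then simply indexes that list, with no slicing, no backward walk and no early return.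
-- intended difference: On index = -1 with a nonempty text whose first character is not searchChar, A returns 0 (its count==target check fires before any occurrence, on leftover loop state), while B returns -1, the intended 'no such occurrence' answer for a nonexistent occurrence index. — e.g. on _getElisionLevelWorker("a", "b", -1): A returns 0, B returns -1
import Mathlib
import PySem

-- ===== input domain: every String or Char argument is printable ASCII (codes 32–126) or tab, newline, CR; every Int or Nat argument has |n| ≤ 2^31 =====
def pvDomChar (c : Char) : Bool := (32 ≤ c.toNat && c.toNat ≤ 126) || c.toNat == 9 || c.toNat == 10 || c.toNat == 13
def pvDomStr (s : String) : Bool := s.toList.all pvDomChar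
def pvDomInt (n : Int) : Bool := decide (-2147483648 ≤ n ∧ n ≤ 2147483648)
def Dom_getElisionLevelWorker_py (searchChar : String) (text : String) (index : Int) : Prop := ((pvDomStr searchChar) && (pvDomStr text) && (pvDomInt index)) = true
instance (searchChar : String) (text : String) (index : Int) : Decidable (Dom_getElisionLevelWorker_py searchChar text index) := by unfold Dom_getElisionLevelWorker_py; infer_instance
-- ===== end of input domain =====

-- B collects, in one pass, the '&'-run length before every occurrence of searchChar and then indexes that list (objective: alternative); on index = -1 with a nonempty text not starting with searchChar, A returns a leftover 0 and B returns -1 (see D_ below).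

-- ===== PORT A =====
-- "for ch1 in reversed(text[:i]): if ch1 == '&': output += 1 else: break"
def pvAmpPrefix (l : List Char) : Int :=
  match l with
  | [] => 0
  | c :: r => if c = '&' then 1 + pvAmpPrefix r else 0

-- the enumerate loop of A; `full` is text's characters (for the slice text[:i])
def pvLoopA (searchChar : List Char) (full : List Char) (target : Int)
    (cs : List Char) (i : Nat) (count : Int) : Int :=
  match cs with
  | [] => -1   -- foundSearchChar stayed False
  | c :: rest =>
    let count' := if searchChar = [c] then count + 1 else count
    if count' = target then pvAmpPrefix ((full.take i).reverse)
    else pvLoopA searchChar full target rest (i + 1) count'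

def getElisionLevelWorker_py (searchChar : String) (text : String) (index : Int) : Int :=
  pvLoopA searchChar.toList text.toList (index + 1) text.toList 0 0

-- ===== PORT B =====
-- the single pass of B: the list `runs` (run appended at each occurrence, then run updated)
def pvRunsB (searchChar : List Char) (cs : List Char) (run : Int) : List Int :=
  match cs with
  | [] => []
  | c :: rest =>
    let rs := pvRunsB searchChar rest (if c = '&' then run + 1 else 0)
    if searchChar = [c] then run :: rs else rs

-- "runs[index] if 0 <= index < len(runs) else -1"
def pvIdxB (rs : List Int) (j : Int) : Int :=
  if 0 ≤ j ∧ j < rs.length then rs.getD j.toNat 0 else -1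

def getElisionLevelWorker_py_alt (searchChar : String) (text : String) (index : Int) : Int :=
  pvIdxB (pvRunsB searchChar.toList text.toList 0) index

-- ===== PRECONDITION & SPEC =====
-- On inputs with index = -1, a nonempty text and a first character different from searchChar,
-- A returns the leftover value 0 of its loop state (no occurrence was ever required or found),
-- while B returns -1, the intended "not found" answer for a nonexistent occurrence index.
def D_getElisionLevelWorker_py (searchChar : String) (text : String) (index : Int) : Prop :=
  index = -1 ∧ text.toList ≠ [] ∧ searchChar.toList ≠ text.toList.take 1
instance (searchChar : String) (text : String) (index : Int) : Decidable (D_getElisionLevelWorker_py searchChar text index) := by unfold D_getElisionLevelWorker_py; infer_instance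

def Spec_getElisionLevelWorker_py (searchChar : String) (text : String) (index : Int) (out : Int) : Prop := ¬ D_getElisionLevelWorker_py searchChar text index → out = getElisionLevelWorker_py_alt searchChar text index
instance (searchChar : String) (text : String) (index : Int) (out : Int) : Decidable (Spec_getElisionLevelWorker_py searchChar text index out) := by unfold Spec_getElisionLevelWorker_py; infer_instance

def pvDiffWitness_getElisionLevelWorker_py : String × String × Int := ("a", "b", -1)
def pvDiffWitnessOut_getElisionLevelWorker_py : Int × Int := (0, -1)

-- ===== CLAIM (what is proved, stated in full; the proofs are below) =====
def Claim_unchanged_getElisionLevelWorker_py : Prop := ∀ (searchChar : String) (text : String) (index : Int), Dom_getElisionLevelWorker_py searchChar text index → Spec_getElisionLevelWorker_py searchChar text index (getElisionLevelWorker_py searchChar text index)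
def Claim_changed_getElisionLevelWorker_py : Prop := Dom_getElisionLevelWorker_py (pvDiffWitness_getElisionLevelWorker_py.1) (pvDiffWitness_getElisionLevelWorker_py.2.1) (pvDiffWitness_getElisionLevelWorker_py.2.2) ∧ D_getElisionLevelWorker_py (pvDiffWitness_getElisionLevelWorker_py.1) (pvDiffWitness_getElisionLevelWorker_py.2.1) (pvDiffWitness_getElisionLevelWorker_py.2.2) ∧ getElisionLevelWorker_py (pvDiffWitness_getElisionLevelWorker_py.1) (pvDiffWitness_getElisionLevelWorker_py.2.1) (pvDiffWitness_getElisionLevelWorker_py.2.2) = pvDiffWitnessOut_getElisionLevelWorker_py.1 ∧ getElisionLevelWorker_py_alt (pvDiffWitness_getElisionLevelWorker_py.1) (pvDiffWitness_getElisionLevelWorker_py.2.1) (pvDiffWitness_getElisionLevelWorker_py.2.2) = pvDiffWitnessOut_getElisionLevelWorker_py.2 ∧ pvDiffWitnessOut_getElisionLevelWorker_py.1 ≠ pvDiffWitnessOut_getElisionLevelWorker_py.2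
def Claim_exact_getElisionLevelWorker_py : Prop := ∀ (searchChar : String) (text : String) (index : Int), Dom_getElisionLevelWorker_py searchChar text index → D_getElisionLevelWorker_py searchChar text index → getElisionLevelWorker_py searchChar text index ≠ getElisionLevelWorker_py_alt searchChar text index

-- ===== LEMMAS AND PROOFS =====

-- once count exceeds target it never comes back: A's loop returns -1
theorem pvLoopA_gt (sc full : List Char) (target : Int) :
    ∀ (cs : List Char) (i : Nat) (count : Int), target < count →
      pvLoopA sc full target cs i count = -1 := by
  intro cs
  induction cs with
  | nil => intro i count _; simp [pvLoopA]
  | cons c rest ih =>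
    intro i count h
    simp only [pvLoopA]
    split <;> (rw [if_neg (by omega)]; exact ih _ _ (by omega))

theorem pvIdxB_cons (x : Int) (rs : List Int) (j : Int) (h : 1 ≤ j) :
    pvIdxB (x :: rs) j = pvIdxB rs (j - 1) := by
  have hj : j.toNat = (j - 1).toNat + 1 := by omega
  simp only [pvIdxB, List.length_cons, hj, List.getD_cons_succ]
  by_cases hlt : j - 1 < (rs.length : Int)
  · rw [if_pos ⟨by omega, by push_cast; omega⟩, if_pos ⟨by omega, hlt⟩]
  · rw [if_neg (by push_cast; omega), if_neg (by omega)]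

-- the main invariant: while count < target, A's loop equals indexing B's runs list
theorem pvLoopA_eq_runs (sc full : List Char) (target : Int) :
    ∀ (cs : List Char) (i : Nat) (count : Int), full.drop i = cs → count < target →
      pvLoopA sc full target cs i count
        = pvIdxB (pvRunsB sc cs (pvAmpPrefix ((full.take i).reverse))) (target - count - 1) := by
  intro cs
  induction cs with
  | nil => intro i count _ h; simp [pvLoopA, pvRunsB, pvIdxB]
  | cons c rest ih =>
    intro i count hdrop hlt
    have hget : full[i]? = some c := by
      have : (full.drop i)[0]? = full[i]? := by
        simp [List.getElem?_drop]
      rw [hdrop] at this; simp at this; exact this.symm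
    have htake : full.take (i + 1) = full.take i ++ [c] := by
      rw [List.take_add_one, hget]; rfl
    have hdrop' : full.drop (i + 1) = rest := by
      rw [← List.drop_drop, hdrop]; rfl
    have hrun : pvAmpPrefix ((full.take (i + 1)).reverse)
        = (if c = '&' then pvAmpPrefix ((full.take i).reverse) + 1 else 0) := by
      rw [htake]
      simp only [List.reverse_append, List.reverse_cons, List.reverse_nil,
        List.nil_append, List.singleton_append, pvAmpPrefix]
      split <;> simp [Int.add_comm]
    simp only [pvLoopA, pvRunsB]
    by_cases hsc : sc = [c]
    · rw [if_pos hsc, if_pos hsc]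
      by_cases hfin : count + 1 = target
      · rw [if_pos hfin]
        have h0 : target - count - 1 = 0 := by omega
        simp [h0, pvIdxB]
      · rw [if_neg hfin]
        rw [ih (i + 1) (count + 1) hdrop' (by omega), hrun,
          pvIdxB_cons _ _ _ (by omega)]
        congr 1
        omega
    · rw [if_neg hsc, if_neg hsc]
      rw [if_neg (by omega)]
      rw [ih (i + 1) count hdrop' hlt, hrun]

-- ===== VERDICT (by name: the statement is the Claim_ definition above) =====
theorem getElisionLevelWorker_py_spec : Claim_unchanged_getElisionLevelWorker_py := by
  intro searchChar text index _ hnd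
  unfold getElisionLevelWorker_py getElisionLevelWorker_py_alt
  by_cases h0 : 0 ≤ index
  · have := pvLoopA_eq_runs searchChar.toList text.toList (index + 1) text.toList 0 0 rfl (by omega)
    simpa [pvAmpPrefix, show index + 1 - 0 - 1 = index by omega] using this
  · by_cases hm1 : index = -1
    · subst hm1
      cases htext : text.toList with
      | nil => simp [pvLoopA, pvRunsB, pvIdxB]
      | cons c rest =>
        by_cases hsc : searchChar.toList = [c]
        · simp only [pvLoopA]
          rw [if_pos hsc, if_neg (by omega), pvLoopA_gt _ _ _ _ _ _ (by omega)]
          simp [pvIdxB]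
        · exact absurd ⟨rfl, by simp [htext], by simp [htext, hsc]⟩ hnd
    · rw [pvLoopA_gt _ _ _ _ _ _ (by omega)]
      simp only [pvIdxB]
      rw [if_neg (by omega)]

theorem getElisionLevelWorker_py_changed : Claim_changed_getElisionLevelWorker_py := by
  unfold Claim_changed_getElisionLevelWorker_py; decide

theorem getElisionLevelWorker_py_tight : Claim_exact_getElisionLevelWorker_py := by
  intro searchChar text index _ hd
  obtain ⟨h1, h2, h3⟩ := hd
  subst h1
  unfold getElisionLevelWorker_py getElisionLevelWorker_py_alt
  cases htext : text.toList with
  | nil => exact absurd htext h2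
  | cons c rest =>
    have hsc : searchChar.toList ≠ [c] := by rw [htext] at h3; simpa using h3
    simp only [pvLoopA]
    rw [if_neg hsc, if_pos (by omega)]
    simp [pvAmpPrefix, pvIdxB]
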